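-- pv_equiv track=rewrite | github.com/efrainvitorno/abstracciondedatos | Segunda parte/Tarea de Listas y Diccionario/Tarea de Listas y Diccionario.py | medallas_pais
-- ===== SOURCE A (Python) =====
-- def Diccionarios():
--     # -- Crear diccionario de paises
--     DP = {
--         "PE": ["PERU", "AMÉRICA"],
--         "BR": ["BRASIL", "AMÉRICA"],
--         "US": ["USA", "AMÉRICA"],
--         "ES": ["ESPAÑA", "EUROPA"],
--         "FR": ["FRANCIA", "EUROPA"],
--         "GE": ["ALEMANIA", "EUROPA"],
--         "NP": ["JAPÓN", "ASIA"],
--         "CH": ["CHINA", "ASIA"],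
--         "EG": ["EGIPTO", "AFRICA"],
--         "AU": ["AUSTRALIA", "OCEANÍA"],
--         "NZ": ["NUEVA ZELANDA", "OCEANÍA"]
--     }
--     # -- Crear diccionario de Disciplinas
--     DD = {
--         "101": ["ATLETISMO 100 MTS", "INDIVIDUAL"],
--         "102": ["ATLETISMO 400 MTS", "INDIVIDUAL"],
--         "204": ["BALONCESTO", "EQUIPO"],
--         "209": ["FÙTBOL", "EQUIPO"],
--         "309": ["KARATE", "INDIVIDUAL"],
--         "511": ["SURF", "INDIVIDUAL"]
--     }
--     # -- Crear diccionario de Resultados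
--     DR = {
--         "101": ["US", "CH", "GE"],
--         "102": ["US", "FR", "BR"],
--         "204": ["US", "FR", "BR"],
--         "209": ["BR", "ES", "US"],
--         "309": ["CH", "NP", "AU"],
--         "511": ["AU", "US", "BR"]
--     }
--     # -- Devolver resultados
--     return DP, DD, DR
--
-- def medallas_pais(pais):
--     DP, DD, DR = Diccionarios()
--     medallas = {"ORO": 0, "PLATA": 0, "BRONCE": 0}
--     for resultados in DR.values():
--         if resultados[0] == pais:
--             medallas["ORO"] += 1
--         if resultados[1] == pais:
--             medallas["PLATA"] += 1
--         if resultados[2] == pais: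
--             medallas["BRONCE"] += 1
--     return medallas
-- ===== SOURCE B (Python) =====
-- def Diccionarios():
--     DP = {
--         "PE": ["PERU", "AMÉRICA"],
--         "BR": ["BRASIL", "AMÉRICA"],
--         "US": ["USA", "AMÉRICA"],
--         "ES": ["ESPAÑA", "EUROPA"],
--         "FR": ["FRANCIA", "EUROPA"],
--         "GE": ["ALEMANIA", "EUROPA"],
--         "NP": ["JAPÓN", "ASIA"],
--         "CH": ["CHINA", "ASIA"],
--         "EG": ["EGIPTO", "AFRICA"],
--         "AU": ["AUSTRALIA", "OCEANÍA"],
--         "NZ": ["NUEVA ZELANDA", "OCEANÍA"]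
--     }
--     DD = {
--         "101": ["ATLETISMO 100 MTS", "INDIVIDUAL"],
--         "102": ["ATLETISMO 400 MTS", "INDIVIDUAL"],
--         "204": ["BALONCESTO", "EQUIPO"],
--         "209": ["FÙTBOL", "EQUIPO"],
--         "309": ["KARATE", "INDIVIDUAL"],
--         "511": ["SURF", "INDIVIDUAL"]
--     }
--     DR = {
--         "101": ["US", "CH", "GE"],
--         "102": ["US", "FR", "BR"],
--         "204": ["US", "FR", "BR"],
--         "209": ["BR", "ES", "US"],
--         "309": ["CH", "NP", "AU"],
--         "511": ["AU", "US", "BR"]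
--     }
--     return DP, DD, DR
--
-- def medallas_pais(pais):
--     # Build the full medal tally for every country once, then look the country up.
--     DP, DD, DR = Diccionarios()
--     MEDALLA = ["ORO", "PLATA", "BRONCE"]
--     tabla = {}
--     for resultados in DR.values():
--         for pos, codigo in enumerate(resultados):
--             fila = tabla.setdefault(codigo, {"ORO": 0, "PLATA": 0, "BRONCE": 0})
--             fila[MEDALLA[pos]] += 1
--     return tabla.get(pais, {"ORO": 0, "PLATA": 0, "BRONCE": 0})
-- ===== Notes on version B (the rewrite author's own statement) =====
-- stated objective: alternative
-- what changed: B builds the complete medal-tally table for every country in one nested enumerate pass over DR.values() and then merely looks the requested country up (defaulting to all zeros), instead of A's per-country filter with three positional comparisons per event.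
import Mathlib
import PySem

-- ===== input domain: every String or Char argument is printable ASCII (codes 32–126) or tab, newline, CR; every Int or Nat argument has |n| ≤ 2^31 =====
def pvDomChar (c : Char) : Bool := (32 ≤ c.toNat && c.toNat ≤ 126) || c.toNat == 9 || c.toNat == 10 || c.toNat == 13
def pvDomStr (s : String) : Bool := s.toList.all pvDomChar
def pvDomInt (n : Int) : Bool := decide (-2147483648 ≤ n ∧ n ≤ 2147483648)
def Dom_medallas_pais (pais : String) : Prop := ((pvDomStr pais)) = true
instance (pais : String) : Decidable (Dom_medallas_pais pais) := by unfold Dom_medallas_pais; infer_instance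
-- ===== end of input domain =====

-- B builds the full medal-tally table in one enumerate pass and looks the country up; alternative decomposition, same cost.


-- ===== PORT A =====
def pvDR : PySem.Dict String (List String) := PySem.Dict.ofList
  [("101", ["US","CH","GE"]), ("102", ["US","FR","BR"]), ("204", ["US","FR","BR"]),
   ("209", ["BR","ES","US"]), ("309", ["CH","NP","AU"]), ("511", ["AU","US","BR"])]

def pvZeros : PySem.Dict String Int := PySem.Dict.ofList [("ORO", 0), ("PLATA", 0), ("BRONCE", 0)]

def medallas_pais (pais : String) : List (String × Int) :=
  let DR := pvDR
  let medallas := pvZeros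
  let medallas := DR.values.foldl (fun m resultados =>
    let m := if PySem.List.pyGetD resultados 0 "" == pais then m.modify "ORO" 0 (· + 1) else m
    let m := if PySem.List.pyGetD resultados 1 "" == pais then m.modify "PLATA" 0 (· + 1) else m
    if PySem.List.pyGetD resultados 2 "" == pais then m.modify "BRONCE" 0 (· + 1) else m) medallas
  medallas.items

-- ===== PORT B =====
def pvMEDALLA : List String := ["ORO", "PLATA", "BRONCE"]

def medallas_pais_alt (pais : String) : List (String × Int) :=
  let DR := pvDR
  let tabla : PySem.Dict String (PySem.Dict String Int) :=
    DR.values.foldl (fun t resultados =>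
      (resultados.zipIdx).foldl (fun t cp =>
        let t := t.setdefault cp.1 pvZeros
        t.modify cp.1 PySem.Dict.empty
          (fun fila => fila.modify (PySem.List.pyGetD pvMEDALLA (cp.2 : Int) "") 0 (· + 1))) t)
      PySem.Dict.empty
  ((tabla.get? pais).getD pvZeros).items

-- ===== PRECONDITION & SPEC =====
def Spec_medallas_pais (pais : String) (out : List (String × Int)) : Prop := out = medallas_pais_alt pais
instance (pais : String) (out : List (String × Int)) : Decidable (Spec_medallas_pais pais out) := by unfold Spec_medallas_pais; infer_instance

-- ===== CLAIM (what is proved, stated in full; the proofs are below) =====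
def Claim_equal_medallas_pais : Prop := ∀ (pais : String), Dom_medallas_pais pais → Spec_medallas_pais pais (medallas_pais pais)

-- ===== LEMMAS AND PROOFS =====

-- ===== VERDICT (by name: the statement is the Claim_ definition above) =====
-- B's tally table does not depend on pais: evaluate it once to a literal dict.
set_option maxRecDepth 4000 in
lemma alt_as_lookup (pais : String) :
    medallas_pais_alt pais =
      (((PySem.Dict.mk
          [("US", PySem.Dict.mk [("ORO", (3 : Int)), ("PLATA", 1), ("BRONCE", 1)]),
           ("CH", PySem.Dict.mk [("ORO", 1), ("PLATA", 1), ("BRONCE", 0)]),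
           ("GE", PySem.Dict.mk [("ORO", 0), ("PLATA", 0), ("BRONCE", 1)]),
           ("FR", PySem.Dict.mk [("ORO", 0), ("PLATA", 2), ("BRONCE", 0)]),
           ("BR", PySem.Dict.mk [("ORO", 1), ("PLATA", 0), ("BRONCE", 3)]),
           ("ES", PySem.Dict.mk [("ORO", 0), ("PLATA", 1), ("BRONCE", 0)]),
           ("NP", PySem.Dict.mk [("ORO", 0), ("PLATA", 1), ("BRONCE", 0)]),
           ("AU", PySem.Dict.mk [("ORO", 1), ("PLATA", 0), ("BRONCE", 1)])]).get? pais).getD pvZeros).items := by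
  rfl

-- A's fold, with the six concrete result lists read off pvDR.
set_option maxRecDepth 4000 in
lemma pvA_eval (pais : String) :
    medallas_pais pais =
      ([["US","CH","GE"], ["US","FR","BR"], ["US","FR","BR"],
        ["BR","ES","US"], ["CH","NP","AU"], ["AU","US","BR"]].foldl (fun m resultados =>
        let m := if PySem.List.pyGetD resultados 0 "" == pais then m.modify "ORO" 0 (· + 1) else m
        let m := if PySem.List.pyGetD resultados 1 "" == pais then m.modify "PLATA" 0 (· + 1) else m
        if PySem.List.pyGetD resultados 2 "" == pais then m.modify "BRONCE" 0 (· + 1) else m) pvZeros).items := by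
  rfl

set_option maxRecDepth 4000 in
theorem medallas_pais_spec : Claim_equal_medallas_pais := by
  intro pais _
  unfold Spec_medallas_pais
  by_cases h1 : pais = "US"; · subst h1; decide
  by_cases h2 : pais = "CH"; · subst h2; decide
  by_cases h3 : pais = "GE"; · subst h3; decide
  by_cases h4 : pais = "FR"; · subst h4; decide
  by_cases h5 : pais = "BR"; · subst h5; decide
  by_cases h6 : pais = "ES"; · subst h6; decide
  by_cases h7 : pais = "NP"; · subst h7; decide
  by_cases h8 : pais = "AU"; · subst h8; decide
  rw [alt_as_lookup, pvA_eval]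
  simp [PySem.List.pyGetD, PySem.List.pyGet?, PySem.List.pyIdx?, PySem.Dict.get?, Ne.symm h1, Ne.symm h2, Ne.symm h3, Ne.symm h4,
        Ne.symm h5, Ne.symm h6, Ne.symm h7, Ne.symm h8, pvZeros]
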